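-- pv_equiv track=rewrite | github.com/Hideyuki-Yamashita/hw_offload | src/cli/commands/pri.py | _setup_opts_dict
-- ===== SOURCE A (Python) =====
-- def _setup_opts_dict(opts_list):
--     """Setup options for sending to spp-ctl as a request body.
--
--     Options is setup from given list. If option has no value, None is
--     assgined for the value. For example,
--       ['-l', '1-2', --no-pci, '-m', '512', ...]
--       => {'-l':'1-2', '--no-pci':None, '-m':'512', ...}
--     """
--     prekey = None
--     opts_dict = {}
--     for opt in opts_list:
--         if opt.startswith('-'):
--             opts_dict[opt] = None
--             prekey = opt
--         else:
--             if prekey is not None: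
--                 opts_dict[prekey] = opt
--                 prekey = None
--     return opts_dict
-- ===== SOURCE B (Python) =====
-- def _setup_opts_dict(opts_list):
--     """Setup options dict by look-ahead over an index instead of a carried prekey."""
--     opts_dict = {}
--     i = 0
--     n = len(opts_list)
--     while i < n:
--         opt = opts_list[i]
--         if opt.startswith('-'):
--             if i + 1 < n and not opts_list[i + 1].startswith('-'):
--                 opts_dict[opt] = opts_list[i + 1]
--                 i += 2
--             else:
--                 opts_dict[opt] = None
--                 i += 1
--         else:
--             i += 1
--     return opts_dict
-- ===== Notes on version B (the rewrite author's own statement) =====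
-- stated objective: alternative
-- what changed: Replaces A's carried prekey accumulator with an index/look-ahead pass: each flag peeks at the next element to decide its value (None or that element) and skips it, instead of threading pending-flag state through the loop.
import Mathlib
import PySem

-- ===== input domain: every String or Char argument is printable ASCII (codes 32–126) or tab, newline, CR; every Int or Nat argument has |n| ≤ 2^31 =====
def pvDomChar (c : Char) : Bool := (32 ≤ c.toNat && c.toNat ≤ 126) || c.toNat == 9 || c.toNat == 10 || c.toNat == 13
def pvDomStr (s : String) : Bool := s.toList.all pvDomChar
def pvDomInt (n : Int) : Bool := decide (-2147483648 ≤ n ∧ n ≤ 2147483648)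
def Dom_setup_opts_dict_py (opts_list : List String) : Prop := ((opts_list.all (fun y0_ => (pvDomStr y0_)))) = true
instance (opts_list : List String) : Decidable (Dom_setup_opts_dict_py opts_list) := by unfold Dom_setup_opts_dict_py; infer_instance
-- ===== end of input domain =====

-- B replaces A's carried 'prekey' state with an index-free look-ahead pass (peek at the
-- next element to decide a flag's value); objective: alternative decomposition, same cost.

-- ===== PORT A =====
-- A's loop: state (prekey, opts_dict), one step per element, in order.
def setup_opts_dict_A_loop (prekey : Option String)
    (d : PySem.Dict String (Option String)) :
    List String → PySem.Dict String (Option String)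
  | [] => d
  | opt :: rest =>
    if PySem.Str.startswith opt "-" then
      setup_opts_dict_A_loop (some opt) (d.insert opt none) rest
    else
      match prekey with
      | some k => setup_opts_dict_A_loop none (d.insert k (some opt)) rest
      | none => setup_opts_dict_A_loop none d rest

def setup_opts_dict_py (opts_list : List String) : List (String × Option String) :=
  (setup_opts_dict_A_loop none PySem.Dict.empty opts_list).items

-- ===== PORT B =====
-- B's while loop over an index i consuming 1 or 2 elements = recursion on the suffix.
def setup_opts_dict_B_loop (d : PySem.Dict String (Option String)) :
    List String → PySem.Dict String (Option String)
  | [] => d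
  | opt :: rest =>
    if PySem.Str.startswith opt "-" then
      match rest with
      | next :: rest2 =>
        if PySem.Str.startswith next "-" then
          setup_opts_dict_B_loop (d.insert opt none) (next :: rest2)
        else
          setup_opts_dict_B_loop (d.insert opt (some next)) rest2
      | [] => d.insert opt none
    else
      setup_opts_dict_B_loop d rest

def setup_opts_dict_py_alt (opts_list : List String) : List (String × Option String) :=
  (setup_opts_dict_B_loop PySem.Dict.empty opts_list).items

-- ===== PRECONDITION & SPEC =====
def Spec_setup_opts_dict_py (opts_list : List String) (out : List (String × Option String)) : Prop := out = setup_opts_dict_py_alt opts_list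
instance (opts_list : List String) (out : List (String × Option String)) : Decidable (Spec_setup_opts_dict_py opts_list out) := by unfold Spec_setup_opts_dict_py; infer_instance

-- ===== CLAIM (what is proved, stated in full; the proofs are below) =====
def Claim_equal_setup_opts_dict_py : Prop := ∀ (opts_list : List String), Dom_setup_opts_dict_py opts_list → Spec_setup_opts_dict_py opts_list (setup_opts_dict_py opts_list)

-- ===== LEMMAS AND PROOFS =====

-- When the head is a flag, A's carried prekey is immediately overwritten, so it is irrelevant.
theorem A_loop_prekey_irrelevant (l : List String) (pk : Option String)
    (d : PySem.Dict String (Option String)) (opt : String)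
    (h : PySem.Str.startswith opt "-" = true) :
    setup_opts_dict_A_loop pk d (opt :: l) = setup_opts_dict_A_loop none d (opt :: l) := by
  simp only [setup_opts_dict_A_loop]
  rw [if_pos h, if_pos h]

-- Main invariant: with no pending prekey, A's loop equals B's look-ahead loop.
theorem A_loop_none_eq_B_loop (l : List String) (d : PySem.Dict String (Option String)) :
    setup_opts_dict_A_loop none d l = setup_opts_dict_B_loop d l := by
  induction d, l using setup_opts_dict_B_loop.induct with
  | case1 d => rfl
  | case2 d opt hf next rest2 hnf ih =>
    -- head flag, next also a flag: A's pending prekey is overwritten before use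
    rw [setup_opts_dict_B_loop.eq_def]
    simp only [if_pos hf, if_pos hnf]
    rw [← ih, ← A_loop_prekey_irrelevant rest2 (some opt) (d.insert opt none) next hnf]
    rw [setup_opts_dict_A_loop.eq_def]
    simp only [if_pos hf]
  | case3 d opt hf next rest2 hnf ih =>
    -- head flag, next is a value: A inserts none then overwrites; B inserts directly
    rw [setup_opts_dict_B_loop.eq_def]
    simp only [if_pos hf, if_neg hnf]
    rw [setup_opts_dict_A_loop.eq_def]
    simp only [if_pos hf]
    rw [setup_opts_dict_A_loop.eq_def]
    simp only [if_neg hnf]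
    rw [PySem.Dict.insert_insert_self, ih]
  | case4 d opt hf =>
    -- head flag, list ends
    rw [setup_opts_dict_B_loop.eq_def]
    rw [setup_opts_dict_A_loop.eq_def]
    simp only [if_pos hf]
    rfl
  | case5 d opt rest hf ih =>
    -- head not a flag, no prekey pending: both drop it
    rw [setup_opts_dict_B_loop.eq_def]
    simp only [if_neg hf]
    rw [setup_opts_dict_A_loop.eq_def]
    simp only [if_neg hf]
    exact ih

-- ===== VERDICT (by name: the statement is the Claim_ definition above) =====
theorem setup_opts_dict_py_spec : Claim_equal_setup_opts_dict_py := by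
  intro opts_list _
  unfold Spec_setup_opts_dict_py setup_opts_dict_py setup_opts_dict_py_alt
  rw [A_loop_none_eq_B_loop]
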